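/- GENERATED by mk_final_copies.py from the proof of the farm's unit `start_decoder.C3c` (farm:start_decoder.C3c.1: Proof.lean) as the
   re-elaboration sweep compiled it — do not edit. -/
/-
  WORKED PROOF of the unit `start_decoder.C3c` (0x114590, one instruction `mov ebp, DWORD PTR [rsp+24H]`): `AtC3X` → `AtC5`. The invariant
  `C3.Inv` with every byte of `lengths` filled gives `InC5` with `lengths = c->codeword_lengths` (dense), `total = 0`.
-/
import Asan.CheckWalk
import Vorbis.Spec.StartDecoderATest
import Vorbis.Spec.Units.start_decoder_C3c

open X86 X86.User Asan Vorbis Vorbis.Spec Vorbis.Spec.StartDecoder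

set_option maxRecDepth 4000

namespace Vorbis.Spec.start_decoder_C3c

/-- **`InC5` from the invariant** at a state with `ebp = 0` whose filled prefix is the whole array: `lengths = CL`, `total = 0`, the
dense branch of `LengthsAt`, L(E) from `filled`. Pure. -/
theorem inC5_of_inv {u₀ : State} {g : Ghost} {i : Nat} {A2 A3 Ai : Arena} {A : Arena × List Obj} {s : State}
    (hI : C3.Inv u₀ g i A2 A3 Ai A Vorbis.L.start_decoder.cut109 (Codebook.entries s.mem (g.cb s.mem i)).toNat s)
    (hrbp : s.reg .rbp = addr 0) :
    InC5 u₀ g i A2 A3 Ai A (Codebook.codeword_lengths s.mem (g.cb s.mem i)) 0 s := by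
  have hsp := hI.sparse0
  refine
    { frame := hI.frame
      cur := hI.cur
      k1 := hI.k1
      rbx := hI.rbx
      rbp := hrbp
      total_le := hI.k1.ent_nonneg
      lenL := ?lenL
      place := ?place
      sparse_total := ?sparse_total
      fresh := hI.fresh }
  case lenL =>
    intro j hj
    exact Or.inl (hI.filled j hj)
  case place =>
    refine
      { sparse_01 := Or.inl hsp
        sparse_temp := ?_
        sparse_null := ?_
        dense_block := fun _ => hI.lengths
        dense_eq := fun _ => rfl
        dense_temps := fun _ => hI.noTemps }
    · intro h1
      rw [hsp] at h1
      exact absurd h1 (by decide)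
    · intro h1
      rw [hsp] at h1
      exact absurd h1 (by decide)
  case sparse_total =>
    intro h1
    rw [hsp] at h1
    exact absurd h1 (by decide)

set_option maxHeartbeats 4000000 in
/-- Segment C3c, walked: the one instruction at 0x114590 reads the literal 0 of `d[R+24H]` (Z24) into `ebp`; nothing is written, so the
invariant is carried by `C3.Inv.carry` with the empty change. -/
theorem segC3c_walk {Lay : Layout} (hLay : Lay.hi = 0x1000000) {μ : Microarch} (hμ : UserX.MicroOK μ) {u₀ : State}
    (hcode : HasCodeNat Lay u₀ Vorbis.L.start_decoder.entry Vorbis.Code.code_start_decoder.nat Vorbis.L.start_decoder.size) :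
    SegC3c Lay μ u₀ := by
  intro g i v hat
  obtain ⟨A, A2, A3, Ai, hI⟩ := hat
  have he := hI.frame.entry
  v_entry he
  have hW := hI.where_
  obtain ⟨q1, q2, q3, q4, q5, q6, q7, q8, q9, q10, q11, q12, q13, q14, q15, q16⟩ := hW
  have w_rip := hI.frame.rip
  have w_eq : Mem.EqOn Vorbis.L.textLo Vorbis.L.textHi u₀.mem v.mem := hI.frame.code
  have hdf : v.flags .df = false := (show abiInv _ from hI.frame.inv).1
  have hmx : v.mxcsr &&& 0x1F80 = 0x1F80 := (show abiInv _ from hI.frame.inv).2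
  have hsse := Vorbis.sseOK_of_abiInv hI.frame.inv
  have hRA : g.RA = (g.e.reg .rsp).toNat := rfl
  have hsp : (v.reg .rsp).toNat = g.R := by
    rw [hI.frame.rsp]
    exact toNat_addr _ (by omega)
  have hslot0 : v.mem.readLE (v.reg .rsp + 36) 4 = 0 := by
    have := hI.cur.sd.frame.z24 (by omega) (by omega)
    rw [hI.frame.rsp]
    simp only [vfield]
    exact this
  u_walk hcode [hμ.vendor] until [Vorbis.L.start_decoder.cut109] span [Vorbis.L.textLo, Vorbis.L.textHi] side (v_side)
  -- 0x114594: ebp = 0, the memory is the one of the loop's exit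
  have hinv : (conv u₀).inv s_114590 := by v_inv
  have hs : Mem.SameExcept (C3.stepWins g.R g.f (Codebook.codeword_lengths v.mem (g.cb v.mem i))
      (Codebook.entries v.mem (g.cb v.mem i)).toNat (Codebook.entries v.mem (g.cb v.mem i)).toNat)
      v.mem s_114590.mem := by
    rw [w_mem]
    exact Mem.SameExcept.refl _ _
  have hbits : Bits (g.Blk A) g.len s_114590.mem g.f := by
    rw [w_mem]
    exact hI.cur.sd.bits
  have hIr := hI.carry (pc' := Vorbis.L.start_decoder.cut109) w_rip (w_kept.get .rsp rfl) (w_kept.get .r14 rfl)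
    (w_kept.get .rbx rfl) hinv hs (Nat.le_refl _) (Nat.le_refl _) (Nat.le_refl _) hbits
  rw [← w_mem] at hIr
  have hrbp : s_114590.reg .rbp = addr 0 := by
    rw [w_rbp]
    rfl
  exact ReachVia.done ⟨A, _, 0, A2, A3, Ai, inC5_of_inv hIr hrbp⟩

end Vorbis.Spec.start_decoder_C3c

theorem Vorbis.Spec.Worked.start_decoder_C3c_ok : Vorbis.Spec.start_decoder_C3c.Statement := by
  intro Lay hLay μ hμ u₀ hcode
  exact Vorbis.Spec.start_decoder_C3c.segC3c_walk hLay hμ hcode
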